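-- pv_equiv track=rewrite | github.com/SimpLord-github/HEVC | bitstream/cabac.py | _diagonal_scan
-- ===== SOURCE A (Python) =====
-- def _diagonal_scan(n: int) -> list[tuple[int, int]]:
--     """
--     Return (row, col) positions in HEVC diagonal scan order.
--     Scans diagonals from top-right to bottom-left, within each 4×4 subblock.
--     For simplicity (golden model): returns raster order for 4×4,
--     and diagonal scan for larger sizes.
--     """
--     positions = []
--     if n <= 4:
--         # Simple diagonal scan for 4×4
--         for d in range(2 * n - 1):
--             for r in range(max(0, d - n + 1), min(d + 1, n)):
--                 c = d - r
--                 if 0 <= c < n: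
--                     positions.append((r, c))
--     else:
--         # Scan 4×4 subblocks in diagonal order, each subblock scanned diagonally
--         num_sub = n // 4
--         sub_scan = _diagonal_scan(num_sub)
--         coeff_scan = _diagonal_scan(4)
--         for (sr, sc) in sub_scan:
--             for (cr, cc) in coeff_scan:
--                 positions.append((sr * 4 + cr, sc * 4 + cc))
--     return positions
-- ===== SOURCE B (Python) =====
-- def _diagonal_scan(n: int) -> list[tuple[int, int]]:
--     """Iterative re-implementation: reduce n by //4 to the base size, build the
--     base diagonal scan by sorting the raster grid by (anti-diagonal, row), then
--     compose level-by-level with the fixed 4x4 diagonal scan."""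
--     s, levels = n, 0
--     while s > 4:
--         s //= 4
--         levels += 1
--     result = _base_scan(s)
--     coeff4 = _base_scan(4)
--     for _ in range(levels):
--         result = [(r * 4 + cr, c * 4 + cc)
--                   for (r, c) in result
--                   for (cr, cc) in coeff4]
--     return result
--
--
-- def _base_scan(s: int) -> list[tuple[int, int]]:
--     grid = [(r, c) for r in range(s) for c in range(s)]
--     return sorted(grid, key=lambda p: (p[0] + p[1], p[0]))
-- ===== Notes on version B (the rewrite author's own statement) =====
-- stated objective: alternative
-- what changed: Replaces A's self-recursion by an explicit //4 reduction chain, a base scan built by sorting the raster grid by (anti-diagonal, row), and iterative level-by-level composition with the fixed 4x4 diagonal scan.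
import Mathlib
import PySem

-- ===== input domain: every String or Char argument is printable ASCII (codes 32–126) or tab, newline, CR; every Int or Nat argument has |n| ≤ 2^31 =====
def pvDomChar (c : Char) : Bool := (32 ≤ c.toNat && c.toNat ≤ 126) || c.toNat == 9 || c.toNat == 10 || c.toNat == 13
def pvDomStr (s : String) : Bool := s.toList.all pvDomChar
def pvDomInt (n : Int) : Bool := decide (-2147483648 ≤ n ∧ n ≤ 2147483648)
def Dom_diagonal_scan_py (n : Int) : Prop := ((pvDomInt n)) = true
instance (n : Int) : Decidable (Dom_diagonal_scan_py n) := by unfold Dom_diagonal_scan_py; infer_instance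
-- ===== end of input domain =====

-- B replaces A's self-recursion by an iterative level-by-level composition with a
-- sorted-grid base scan (objective: alternative decomposition, same cost).

-- ===== PORT A =====
def diagonal_scan_py (n : Int) : List (Int × Int) :=
  if n ≤ 4 then
    (PySem.List.pyRange 0 (2 * n - 1) 1).foldl (fun acc d =>
      (PySem.List.pyRange (max 0 (d - n + 1)) (min (d + 1) n) 1).foldl (fun acc r =>
        let c := d - r
        if 0 ≤ c ∧ c < n then acc ++ [(r, c)] else acc) acc) []
  else
    let num_sub := PySem.Int.floordiv n 4
    let sub_scan := diagonal_scan_py num_sub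
    let coeff_scan := diagonal_scan_py 4
    sub_scan.foldl (fun acc p =>
      coeff_scan.foldl (fun acc q => acc ++ [(p.1 * 4 + q.1, p.2 * 4 + q.2)]) acc) []
termination_by n.toNat
decreasing_by
  · rw [PySem.Int.floordiv_eq_ediv_of_pos (by omega : (0:Int) < 4)]; omega
  · omega

-- ===== PORT B =====
-- the while-loop 's, levels = n, 0; while s > 4: s //= 4; levels += 1' of Source B
def pvChain (n : Int) : Int × Int :=
  if n > 4 then
    let p := pvChain (PySem.Int.floordiv n 4)
    (p.1, p.2 + 1)
  else (n, 0)
termination_by n.toNat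
decreasing_by
  rw [PySem.Int.floordiv_eq_ediv_of_pos (by omega : (0:Int) < 4)]; omega

-- _base_scan of Source B: raster grid sorted by the tuple key (r + c, r)
def pvBase (s : Int) : List (Int × Int) :=
  PySem.List.sorted2
    ((PySem.List.pyRange 0 s 1).flatMap (fun r =>
      (PySem.List.pyRange 0 s 1).map (fun c => (r, c))))
    (fun p => p.1 + p.2) (fun p => p.1)

-- one level of composition: the list comprehension of Source B
def pvExpand (res c4 : List (Int × Int)) : List (Int × Int) :=
  res.flatMap (fun p => c4.map (fun q => (p.1 * 4 + q.1, p.2 * 4 + q.2)))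

def diagonal_scan_py_alt (n : Int) : List (Int × Int) :=
  let sl := pvChain n
  let c4 := pvBase 4
  (PySem.List.pyRange 0 sl.2 1).foldl (fun res _ => pvExpand res c4) (pvBase sl.1)

-- ===== PRECONDITION & SPEC =====
def Spec_diagonal_scan_py (n : Int) (out : List (Int × Int)) : Prop := out = diagonal_scan_py_alt n
instance (n : Int) (out : List (Int × Int)) : Decidable (Spec_diagonal_scan_py n out) := by unfold Spec_diagonal_scan_py; infer_instance

-- ===== CLAIM (what is proved, stated in full; the proofs are below) =====
def Claim_equal_diagonal_scan_py : Prop := ∀ (n : Int), Dom_diagonal_scan_py n → Spec_diagonal_scan_py n (diagonal_scan_py n)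

-- ===== LEMMAS AND PROOFS =====

theorem pv_base_small (n : Int) (h : n ≤ 4) : diagonal_scan_py n = pvBase n := by
  by_cases hn : n < 1
  · rw [diagonal_scan_py]
    rw [if_pos h, PySem.List.pyRange_one_eq_nil (by omega : 2 * n - 1 ≤ 0)]
    unfold pvBase
    rw [PySem.List.pyRange_one_eq_nil (by omega : n ≤ 0)]
    simp [PySem.List.sorted2]
  · have h1 : 1 ≤ n := by omega
    interval_cases n <;> (rw [diagonal_scan_py]; decide)

theorem pv_chain_nonneg (n : Int) : 0 ≤ (pvChain n).2 := by
  induction n using pvChain.induct with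
  | case1 n h ih => rw [pvChain, if_pos h]; dsimp only; omega
  | case2 n h => rw [pvChain, if_neg h]

theorem pv_nested_eq (sub coeff : List (Int × Int)) (init : List (Int × Int)) :
    sub.foldl (fun acc p =>
      coeff.foldl (fun acc q => acc ++ [(p.1 * 4 + q.1, p.2 * 4 + q.2)]) acc) init
    = init ++ pvExpand sub coeff := by
  induction sub generalizing init with
  | nil => simp [pvExpand]
  | cons p t ih =>
    rw [List.foldl_cons, ih, PySem.List.foldl_append_singleton_eq_map]
    simp [pvExpand]

theorem pv_alt_step (n : Int) (h : n > 4) :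
    diagonal_scan_py_alt n
      = pvExpand (diagonal_scan_py_alt (PySem.Int.floordiv n 4)) (pvBase 4) := by
  unfold diagonal_scan_py_alt
  conv_lhs => rw [pvChain]
  rw [if_pos h]
  dsimp only
  rw [PySem.List.pyRange_one_succ_right (pv_chain_nonneg _), List.foldl_append,
    List.foldl_cons, List.foldl_nil]

theorem pv_alt_base (n : Int) (h : n ≤ 4) : diagonal_scan_py_alt n = pvBase n := by
  unfold diagonal_scan_py_alt
  rw [pvChain, if_neg (by omega : ¬ n > 4)]
  dsimp only
  rw [PySem.List.pyRange_one_eq_nil le_rfl]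
  rfl

theorem pv_main (n : Int) : diagonal_scan_py n = diagonal_scan_py_alt n := by
  induction n using diagonal_scan_py.induct with
  | case1 n h =>
    rw [pv_base_small n h, pv_alt_base n h]
  | case2 n h m ih1 ih2 =>
    have hm : m = PySem.Int.floordiv n 4 := rfl
    rw [hm] at ih1
    rw [diagonal_scan_py, if_neg h]
    dsimp only
    rw [pv_nested_eq, List.nil_append, ih1, pv_base_small 4 le_rfl,
      pv_alt_step n (by omega)]

-- ===== VERDICT (by name: the statement is the Claim_ definition above) =====
theorem diagonal_scan_py_spec : Claim_equal_diagonal_scan_py := by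
  intro n _
  unfold Spec_diagonal_scan_py
  exact pv_main n
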